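-- pv_equiv track=rewrite | github.com/takashiharano/util | python/util.py | strp_index
-- ===== SOURCE A (Python) =====
-- def strp_index(chars, pattern):
--     ptn_len = len(pattern)
--     rdx = len(chars)
--     idx = 0
--     for i in range(ptn_len):
--         d = ptn_len - i - 1
--         c = pattern[d:d + 1]
--         v = chars.find(c) + 1
--         n = v * (rdx ** i)
--         idx += n
--     return idx
-- ===== SOURCE B (Python) =====
-- def strp_index(chars, pattern):
--     rdx = len(chars)
--     idx = 0
--     for c in pattern:
--         idx = idx * rdx + (chars.find(c) + 1)
--     return idx
-- ===== Notes on version B (the rewrite author's own statement) =====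
-- stated objective: simpler
-- what changed: Replaces the back-to-front sum of chars.find(c)+1 times rdx**i with a single left-to-right Horner accumulator idx = idx*rdx + (chars.find(c)+1), removing the explicit exponentiation and index arithmetic.
import Mathlib
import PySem

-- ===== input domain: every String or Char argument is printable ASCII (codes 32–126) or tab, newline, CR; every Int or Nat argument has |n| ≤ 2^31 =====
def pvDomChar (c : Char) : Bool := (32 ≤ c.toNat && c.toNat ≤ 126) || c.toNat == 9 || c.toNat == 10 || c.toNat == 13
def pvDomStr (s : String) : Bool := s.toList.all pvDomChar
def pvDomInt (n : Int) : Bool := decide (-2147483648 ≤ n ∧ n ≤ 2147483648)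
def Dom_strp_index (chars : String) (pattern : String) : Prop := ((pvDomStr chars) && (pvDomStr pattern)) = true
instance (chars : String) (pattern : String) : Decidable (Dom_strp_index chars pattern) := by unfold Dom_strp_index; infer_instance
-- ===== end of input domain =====

-- B replaces A's back-to-front sum of find(c)+1 times rdx**i with a left-to-right Horner accumulator (simpler; same cost).

-- ===== PORT A =====
def strp_index (chars : String) (pattern : String) : Int :=
  let ptn_len : Int := PySem.Str.len pattern
  let rdx : Int := PySem.Str.len chars
  (PySem.List.pyRange 0 ptn_len 1).foldl (fun idx i =>
    let d := ptn_len - i - 1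
    let c := PySem.Str.slice pattern (some d) (some (d + 1))
    let v := PySem.Str.find chars c + 1
    let n := v * rdx ^ i.toNat
    idx + n) 0

-- ===== PORT B =====
def strp_index_alt (chars : String) (pattern : String) : Int :=
  let rdx : Int := PySem.Str.len chars
  pattern.toList.foldl (fun idx c => idx * rdx + (PySem.Str.find chars (String.ofList [c]) + 1)) 0

-- ===== PRECONDITION & SPEC =====
def Spec_strp_index (chars : String) (pattern : String) (out : Int) : Prop := out = strp_index_alt chars pattern
instance (chars : String) (pattern : String) (out : Int) : Decidable (Spec_strp_index chars pattern out) := by unfold Spec_strp_index; infer_instance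

-- ===== CLAIM (what is proved, stated in full; the proofs are below) =====
def Claim_equal_strp_index : Prop := ∀ (chars : String) (pattern : String), Dom_strp_index chars pattern → Spec_strp_index chars pattern (strp_index chars pattern)

-- ===== LEMMAS AND PROOFS =====

theorem horner_eq_sum (cs : List Char) (p : List Char) :
    p.foldl (fun idx c => idx * (cs.length : Int) + (PySem.Chars.find cs [c] + 1)) 0 =
      ((List.range p.length).map (fun k =>
        (PySem.Chars.find cs ((p.drop (p.length - 1 - k)).take 1) + 1) * (cs.length : Int) ^ k)).sum := by
  induction p using List.reverseRecOn with
  | nil => simp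
  | append_singleton p c ih =>
    rw [List.foldl_append, ih]
    have hlen : (p ++ [c]).length = p.length + 1 := by simp
    rw [hlen, List.range_succ_eq_map, List.map_cons, List.map_map, List.sum_cons]
    have h0 : (p ++ [c]).drop (p.length + 1 - 1 - 0) = [c] := by
      simp
    rw [h0]
    have hcong : (List.range p.length).map
        ((fun k => (PySem.Chars.find cs (((p ++ [c]).drop (p.length + 1 - 1 - k)).take 1) + 1) * (cs.length : Int) ^ k) ∘ Nat.succ)
      = (List.range p.length).map (fun k =>
          ((PySem.Chars.find cs ((p.drop (p.length - 1 - k)).take 1) + 1) * (cs.length : Int) ^ k) * (cs.length : Int)) := by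
      apply List.map_congr_left
      intro k hk
      rw [List.mem_range] at hk
      have h1 : p.length + 1 - 1 - Nat.succ k = p.length - 1 - k := by omega
      have h2 : p.length - 1 - k ≤ p.length := by omega
      have hdrop : (p ++ [c]).drop (p.length - 1 - k) = p.drop (p.length - 1 - k) ++ [c] :=
        List.drop_append_of_le_length h2
      have hlen2 : 1 ≤ (p.drop (p.length - 1 - k)).length := by
        rw [List.length_drop]; omega
      have htake : (p.drop (p.length - 1 - k) ++ [c]).take 1 = (p.drop (p.length - 1 - k)).take 1 :=
        List.take_append_of_le_length hlen2
      simp only [Function.comp_apply, h1, hdrop, htake]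
      rw [pow_succ]
      ring
    rw [hcong, List.sum_map_mul_right, List.foldl_cons, List.foldl_nil]
    have ht : List.take 1 [c] = [c] := rfl
    rw [ht]
    ring

theorem A_eq_sum (cs p : List Char) :
    (PySem.List.pyRange 0 (p.length : Int) 1).foldl (fun idx i =>
      idx + (PySem.Chars.find cs (PySem.List.slice p (some ((p.length : Int) - i - 1)) (some ((p.length : Int) - i - 1 + 1))) + 1) * (cs.length : Int) ^ i.toNat) 0
    = ((List.range p.length).map (fun k =>
        (PySem.Chars.find cs ((p.drop (p.length - 1 - k)).take 1) + 1) * (cs.length : Int) ^ k)).sum := by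
  rw [PySem.List.foldl_add, PySem.List.pyRange_zero_natCast, List.map_map, zero_add]
  apply congrArg List.sum
  apply List.map_congr_left
  intro k hk
  rw [List.mem_range] at hk
  simp only [Function.comp_apply, Int.toNat_natCast]
  have ha : (0:Int) ≤ (p.length : Int) - (k : Int) - 1 := by omega
  rw [PySem.List.slice_toNat (ha := ha) (hb := by omega)]
  have h1 : ((p.length : Int) - (k : Int) - 1).toNat = p.length - 1 - k := by omega
  have h2 : ((p.length : Int) - (k : Int) - 1 + 1).toNat - (p.length - 1 - k) = 1 := by omega
  rw [h1, h2]

-- ===== VERDICT (by name: the statement is the Claim_ definition above) =====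
theorem strp_index_spec : Claim_equal_strp_index := by
  intro chars pattern _
  unfold Spec_strp_index strp_index strp_index_alt
  simp only [PySem.Str.find_eq, PySem.Str.len_eq, PySem.Str.toList_slice,
    PySem.Chars.slice_eq_listSlice, String.toList_ofList]
  rw [A_eq_sum chars.toList pattern.toList, ← horner_eq_sum]
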